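-- pv_equiv track=rewrite | github.com/franmacke/tp1-tda | greedy.py | buscar_mejor_timestamp
-- ===== SOURCE A (Python) =====
-- def buscar_mejor_timestamp(timestamps, transaccion):
--     """
--     Busca el mejor timestamp para una transacción dada.
--
--     :param timestamps: list, lista de timestamps ordenada por timestamp.
--     :param transaccion: int, transacción a buscar.
--
--     :return: tuple, el mejor timestamp y su error.
--     """
--
--     opciones = []
--     for timestamp, error in timestamps:
--         if dentro_de_rango(transaccion, (timestamp, error)):
--             opciones.append((timestamp, error))
--
--     if not opciones:
--         return None
--
--     ventanas = [((timestamp, error), timestamp + error - transaccion) for timestamp, error in opciones]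
--
--     menor_error = min(ventanas, key=lambda x: x[1])
--
--     return menor_error[0][0], menor_error[0][1]
--
-- def dentro_de_rango(transaccion, timestamp):
--     """
--     :param transaccion: int, transaccion a verificar
--     :param timestamp: tuple, (timestamp, error)
--     """
--     return timestamp[0] - timestamp[1] <= transaccion <= timestamp[0] + timestamp[1]
-- ===== SOURCE B (Python) =====
-- def buscar_mejor_timestamp(timestamps, transaccion):
--     best = None          # (timestamp, error)
--     best_score = None    # timestamp + error - transaccion
--     for timestamp, error in timestamps:
--         if timestamp - error <= transaccion <= timestamp + error:
--             score = timestamp + error - transaccion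
--             if best is None or score < best_score:
--                 best = (timestamp, error)
--                 best_score = score
--     return best
-- ===== Notes on version B (the rewrite author's own statement) =====
-- stated objective: simpler
-- what changed: Single streaming pass keeping a running best (timestamp,error) with strict-< score updates, replacing A's three phases (filter loop, window-list comprehension, min over windows).
import Mathlib
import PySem

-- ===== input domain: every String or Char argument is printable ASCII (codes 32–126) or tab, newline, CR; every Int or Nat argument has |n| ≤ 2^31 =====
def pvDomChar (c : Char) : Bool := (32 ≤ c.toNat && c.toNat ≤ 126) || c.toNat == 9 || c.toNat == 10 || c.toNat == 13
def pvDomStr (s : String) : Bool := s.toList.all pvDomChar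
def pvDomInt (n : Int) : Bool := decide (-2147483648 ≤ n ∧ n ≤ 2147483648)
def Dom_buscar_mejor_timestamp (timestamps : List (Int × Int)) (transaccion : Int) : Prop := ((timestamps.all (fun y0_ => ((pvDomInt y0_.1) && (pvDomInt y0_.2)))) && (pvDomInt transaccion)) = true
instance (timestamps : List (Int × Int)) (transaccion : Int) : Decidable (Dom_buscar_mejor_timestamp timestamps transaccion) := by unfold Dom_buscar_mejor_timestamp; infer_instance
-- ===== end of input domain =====

-- ===== PORT A =====
def dentro_de_rango (transaccion : Int) (timestamp : Int × Int) : Bool :=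
  decide (timestamp.1 - timestamp.2 ≤ transaccion ∧ transaccion ≤ timestamp.1 + timestamp.2)

def buscar_mejor_timestamp (timestamps : List (Int × Int)) (transaccion : Int) : Option (Int × Int) :=
  let opciones := timestamps.foldl
    (fun acc p => if dentro_de_rango transaccion p then acc ++ [(p.1, p.2)] else acc) []
  if opciones = [] then none
  else
    let ventanas := opciones.map (fun p => ((p.1, p.2), p.1 + p.2 - transaccion))
    -- Python's min(ventanas, key=lambda x: x[1]) is PySem.List.min? (first extremal);
    -- the none branch is unreachable here (ventanas is nonempty under the guard).
    match PySem.List.min? ventanas (fun x => x.2) with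
    | none => none
    | some menor_error => some (menor_error.1.1, menor_error.1.2)

-- B: one streaming pass maintaining the running best with strict-< updates (objective: simpler)
-- ===== PORT B =====
def bmtStep (transaccion : Int) (best : Option ((Int × Int) × Int)) (p : Int × Int) :
    Option ((Int × Int) × Int) :=
  if p.1 - p.2 ≤ transaccion ∧ transaccion ≤ p.1 + p.2 then
    let score := p.1 + p.2 - transaccion
    match best with
    | none => some ((p.1, p.2), score)
    | some b => if score < b.2 then some ((p.1, p.2), score) else some b
  else best

def buscar_mejor_timestamp_alt (timestamps : List (Int × Int)) (transaccion : Int) :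
    Option (Int × Int) :=
  (timestamps.foldl (bmtStep transaccion) none).map (fun b => b.1)

-- ===== PRECONDITION & SPEC =====
def Spec_buscar_mejor_timestamp (timestamps : List (Int × Int)) (transaccion : Int) (out : Option (Int × Int)) : Prop := out = buscar_mejor_timestamp_alt timestamps transaccion
instance (timestamps : List (Int × Int)) (transaccion : Int) (out : Option (Int × Int)) : Decidable (Spec_buscar_mejor_timestamp timestamps transaccion out) := by unfold Spec_buscar_mejor_timestamp; infer_instance

-- ===== CLAIM (what is proved, stated in full; the proofs are below) =====
def Claim_equal_buscar_mejor_timestamp : Prop := ∀ (timestamps : List (Int × Int)) (transaccion : Int), Dom_buscar_mejor_timestamp timestamps transaccion → Spec_buscar_mejor_timestamp timestamps transaccion (buscar_mejor_timestamp timestamps transaccion)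

-- ===== LEMMAS AND PROOFS =====

-- the running-best step of B, from a `some` accumulator, is the plain strict-< min fold
-- over the in-range elements paired with their scores
theorem pvFoldSome (tr : Int) (l : List (Int × Int)) (b : (Int × Int) × Int) :
    l.foldl (bmtStep tr) (some b) =
      some (((l.filter (dentro_de_rango tr)).map (fun p => (p, p.1 + p.2 - tr))).foldl
        (fun b x => if x.2 < b.2 then x else b) b) := by
  induction l generalizing b with
  | nil => simp
  | cons p l ih =>
    by_cases h : p.1 - p.2 ≤ tr ∧ tr ≤ p.1 + p.2
    · have hb : dentro_de_rango tr p = true := by simp [dentro_de_rango, h]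
      simp only [List.foldl_cons, bmtStep, if_pos h, List.filter_cons, hb, if_true,
        List.map_cons, Prod.mk.eta]
      split_ifs with hc
      · exact ih _
      · exact ih _
    · have hb : dentro_de_rango tr p = false := by simp only [dentro_de_rango, decide_eq_false_iff_not]; exact h
      simp only [List.foldl_cons, bmtStep, if_neg h, List.filter_cons, hb, Bool.false_eq_true,
        if_false]
      exact ih _

-- B's whole loop, from the initial `none`
theorem pvFoldNone (tr : Int) (l : List (Int × Int)) :
    l.foldl (bmtStep tr) none =
      match (l.filter (dentro_de_rango tr)).map (fun p => (p, p.1 + p.2 - tr)) with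
      | [] => none
      | v :: vs => some (vs.foldl (fun b x => if x.2 < b.2 then x else b) v) := by
  induction l with
  | nil => simp
  | cons p l ih =>
    by_cases h : p.1 - p.2 ≤ tr ∧ tr ≤ p.1 + p.2
    · have hb : dentro_de_rango tr p = true := by simp [dentro_de_rango, h]
      simp only [List.foldl_cons, bmtStep, if_pos h, List.filter_cons, hb, if_true,
        List.map_cons, Prod.mk.eta]
      exact pvFoldSome tr l _
    · have hb : dentro_de_rango tr p = false := by simp only [dentro_de_rango, decide_eq_false_iff_not]; exact h
      simp only [List.foldl_cons, bmtStep, if_neg h, List.filter_cons, hb, Bool.false_eq_true,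
        if_false]
      exact ih

-- PySem.List.min?'s option fold, from a `some` accumulator, is the plain strict-< min fold
theorem pvMinSome {α κ : Type} [LinearOrder κ] (k : α → κ) (vs : List α) (m : α) :
    vs.foldl
        (fun acc x =>
          match acc with
          | none => some x
          | some m => if k x < k m then some x else some m) (some m) =
      some (vs.foldl (fun b x => if k x < k b then x else b) m) := by
  induction vs generalizing m with
  | nil => rfl
  | cons x vs ih =>
    simp only [List.foldl_cons]
    split_ifs with hc
    · exact ih _
    · exact ih _

-- first-wins min with key on a nonempty list
theorem pvMin?_cons {α κ : Type} [LinearOrder κ] (k : α → κ) (v : α) (vs : List α) :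
    PySem.List.min? (v :: vs) k =
      some (vs.foldl (fun b x => if k x < k b then x else b) v) := by
  simp only [PySem.List.min?, List.foldl_cons]
  exact pvMinSome k vs v


-- ===== VERDICT (by name: the statement is the Claim_ definition above) =====
theorem buscar_mejor_timestamp_spec : Claim_equal_buscar_mejor_timestamp := by
  intro l tr _
  unfold Spec_buscar_mejor_timestamp buscar_mejor_timestamp buscar_mejor_timestamp_alt
  simp only [Prod.mk.eta]
  rw [PySem.List.foldl_append_if_eq_filter, List.nil_append, pvFoldNone]
  rcases hf : l.filter (dentro_de_rango tr) with _ | ⟨v, vs⟩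
  · simp
  · simp only [List.map_cons, pvMin?_cons, if_neg (by simp : ¬(v :: vs = [])),
      Option.map_some]
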